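-- pv_equiv track=rewrite | github.com/nipype/pydra | pydra/engine/auxiliary.py | remove_inp_from_splitter_rpn
-- ===== SOURCE A (Python) =====
-- def remove_inp_from_splitter_rpn(splitter_rpn, inputs_to_remove):
--     """modifying splitter_rpn: removing inputs due to combining"""
--     splitter_rpn_copy = splitter_rpn.copy()
--     # reverting order
--     splitter_rpn_copy.reverse()
--     stack_inp = []
--     stack_sgn = []
--     from_last_sign = []
--     for (ii, el) in enumerate(splitter_rpn_copy):
--         # element is a sign
--         if el == "." or el == "*":
--             stack_sgn.append((ii, el))
--             from_last_sign.append(0)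
--         # it's an input but not to remove
--         elif el not in inputs_to_remove:
--             if from_last_sign:
--                 from_last_sign[-1] += 1
--             stack_inp.append((ii, el))
--         # it'a an input that should be removed
--         else:
--             if not from_last_sign:
--                 pass
--             elif from_last_sign[-1] <= 1:
--                 stack_sgn.pop()
--                 from_last_sign.pop()
--             else:
--                 stack_sgn.pop(-1 * from_last_sign.pop())
--
--     # creating the final splitter_rpn after combining
--     remaining_elements = stack_sgn + stack_inp
--     remaining_elements.sort(reverse=True)
--     splitter_rpn_combined = [el for (i, el) in remaining_elements]
--     return splitter_rpn_combined
-- ===== SOURCE B (Python) =====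
-- def remove_inp_from_splitter_rpn(splitter_rpn, inputs_to_remove):
--     """modifying splitter_rpn: removing inputs due to combining"""
--     to_remove = set(inputs_to_remove)
--     removed = set()  # positions (in splitter_rpn) dropped from the output
--     sgn_pos = []     # positions of the operators still alive, in scan order
--     counts = []      # kept-input counters, parallel to sgn_pos
--     for pos, el in reversed(list(enumerate(splitter_rpn))):
--         if el == "." or el == "*":
--             sgn_pos.append(pos)
--             counts.append(0)
--         elif el not in to_remove:
--             if counts:
--                 counts[-1] += 1
--         else:
--             removed.add(pos)
--             if counts:
--                 c = counts.pop()
--                 removed.add(sgn_pos.pop() if c <= 1 else sgn_pos.pop(-c))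
--     return [el for pos, el in enumerate(splitter_rpn) if pos not in removed]
-- ===== Notes on version B (the rewrite author's own statement) =====
-- stated objective: faster
-- what changed: B classifies removals in one reverse scan using a hash set for inputs_to_remove and a set of removed positions, then emits the result by a single forward filter of the original list, replacing A's per-element list-membership test, its two (index,element) stacks and the final sort of their concatenation.
import Mathlib
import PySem

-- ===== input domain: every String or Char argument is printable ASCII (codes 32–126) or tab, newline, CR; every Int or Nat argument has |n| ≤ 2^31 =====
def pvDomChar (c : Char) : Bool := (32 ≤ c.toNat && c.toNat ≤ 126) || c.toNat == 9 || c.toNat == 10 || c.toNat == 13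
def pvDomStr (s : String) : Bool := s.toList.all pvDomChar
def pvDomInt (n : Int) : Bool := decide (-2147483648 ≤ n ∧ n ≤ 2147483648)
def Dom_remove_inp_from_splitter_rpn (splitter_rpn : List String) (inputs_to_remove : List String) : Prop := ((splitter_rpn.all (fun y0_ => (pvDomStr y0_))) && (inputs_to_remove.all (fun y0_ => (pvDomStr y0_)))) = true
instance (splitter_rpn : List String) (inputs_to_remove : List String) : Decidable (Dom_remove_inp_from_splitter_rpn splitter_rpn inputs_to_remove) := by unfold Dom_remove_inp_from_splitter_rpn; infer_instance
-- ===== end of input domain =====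

-- B removes A's per-element list-membership scan, its two (index,element) stacks and the final
-- sort: one reverse scan marks removed positions in a set, one forward filter emits the result.

-- ===== PORT A =====
-- loop body of A's 'for (ii, el) in enumerate(splitter_rpn_copy)'; state none = IndexError raised
def pvStepA (inputs_to_remove : List String)
    (st : Option (List (Int × String) × List (Int × String) × List Int))
    (p : Int × String) : Option (List (Int × String) × List (Int × String) × List Int) :=
  match st with
  | none => none
  | some (stack_inp, stack_sgn, from_last_sign) =>
    if p.2 = "." ∨ p.2 = "*" then
      some (stack_inp, stack_sgn ++ [p], from_last_sign ++ [(0 : Int)])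
    else if p.2 ∉ inputs_to_remove then
      some (stack_inp ++ [p], stack_sgn,
        if from_last_sign ≠ [] then
          PySem.List.pySetD from_last_sign (-1) (PySem.List.pyGetD from_last_sign (-1) 0 + 1)
        else from_last_sign)
    else if from_last_sign = [] then
      some (stack_inp, stack_sgn, from_last_sign)
    else if PySem.List.pyGetD from_last_sign (-1) 0 ≤ 1 then
      match PySem.List.pop? stack_sgn, PySem.List.pop? from_last_sign with
      | some (_, sgn'), some (_, fls') => some (stack_inp, sgn', fls')
      | _, _ => none
    else
      match PySem.List.pop? from_last_sign with
      | some (c, fls') =>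
        match PySem.List.pop? stack_sgn (-1 * c) with
        | some (_, sgn') => some (stack_inp, sgn', fls')
        | none => none
      | none => none

def remove_inp_from_splitter_rpn (splitter_rpn : List String) (inputs_to_remove : List String) : List String :=
  let splitter_rpn_copy := splitter_rpn.reverse
  match (PySem.List.enumerate splitter_rpn_copy).foldl (pvStepA inputs_to_remove)
      (some ([], [], [])) with
  | none => []   -- Python raises IndexError here; excluded by Pre_
  | some (stack_inp, stack_sgn, _) =>
    (PySem.List.sorted2 (stack_sgn ++ stack_inp) (fun q => q.1) (fun q => q.2) true).map
      (fun q => q.2)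

-- ===== PORT B =====
-- loop body of B's reverse scan; state none = IndexError raised (same out-of-range pop)
def pvStepB (to_remove : PySem.Set String)
    (st : Option (PySem.Set Int × List Int × List Int))
    (p : Int × String) : Option (PySem.Set Int × List Int × List Int) :=
  match st with
  | none => none
  | some (removed, sgn_pos, counts) =>
    if p.2 = "." ∨ p.2 = "*" then
      some (removed, sgn_pos ++ [p.1], counts ++ [(0 : Int)])
    else if ¬ PySem.Set.contains to_remove p.2 then
      some (removed, sgn_pos,
        if counts ≠ [] then
          PySem.List.pySetD counts (-1) (PySem.List.pyGetD counts (-1) 0 + 1)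
        else counts)
    else
      let removed' := PySem.Set.add removed p.1
      if counts ≠ [] then
        match PySem.List.pop? counts with
        | some (c, counts') =>
          match (if c ≤ 1 then PySem.List.pop? sgn_pos else PySem.List.pop? sgn_pos (-1 * c)) with
          | some (q, sgn') => some (PySem.Set.add removed' q, sgn', counts')
          | none => none
        | none => none
      else some (removed', sgn_pos, counts)

def remove_inp_from_splitter_rpn_alt (splitter_rpn : List String) (inputs_to_remove : List String) : List String :=
  let to_remove : PySem.Set String := PySem.Set.ofList inputs_to_remove
  match ((PySem.List.enumerate splitter_rpn).reverse).foldl (pvStepB to_remove)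
      (some (PySem.Set.empty, [], [])) with
  | none => []   -- same out-of-range pop as A; excluded by Pre_
  | some (removed, _, _) =>
    (PySem.List.enumerate splitter_rpn).foldr
      (fun p acc => if PySem.Set.contains removed p.1 then acc else p.2 :: acc) []

-- ===== PRECONDITION & SPEC =====
-- Pre_ excludes exactly the inputs on which Python A raises IndexError: a removed input whose
-- pending operator pop 'stack_sgn.pop(-count)' reaches below the operator stack. Every
-- well-formed RPN splitter (binary '.'/'*') satisfies it. cnt is the stack of kept-input
-- counters (head = innermost); the scan only checks that each pop stays in range.
def pvNoCrash (inputs_to_remove : List String) : List String → List Int → Bool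
  | [], _ => true
  | el :: rest, cnt =>
    if el = "." ∨ el = "*" then pvNoCrash inputs_to_remove rest (0 :: cnt)
    else if el ∉ inputs_to_remove then
      pvNoCrash inputs_to_remove rest
        (match cnt with | [] => [] | c :: t => (c + 1) :: t)
    else
      match cnt with
      | [] => pvNoCrash inputs_to_remove rest []
      | c :: t =>
        if 1 < c ∧ ((t.length : Int) + 1) < c then false
        else pvNoCrash inputs_to_remove rest t

def Pre_remove_inp_from_splitter_rpn (splitter_rpn : List String) (inputs_to_remove : List String) : Prop :=
  pvNoCrash inputs_to_remove splitter_rpn.reverse [] = true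
instance (splitter_rpn : List String) (inputs_to_remove : List String) : Decidable (Pre_remove_inp_from_splitter_rpn splitter_rpn inputs_to_remove) := by unfold Pre_remove_inp_from_splitter_rpn; infer_instance

def pvWitness_remove_inp_from_splitter_rpn : List String × List String := (["a", "b", "."], ["b"])

def Spec_remove_inp_from_splitter_rpn (splitter_rpn : List String) (inputs_to_remove : List String) (out : List String) : Prop := out = remove_inp_from_splitter_rpn_alt splitter_rpn inputs_to_remove
instance (splitter_rpn : List String) (inputs_to_remove : List String) (out : List String) : Decidable (Spec_remove_inp_from_splitter_rpn splitter_rpn inputs_to_remove out) := by unfold Spec_remove_inp_from_splitter_rpn; infer_instance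

-- ===== CLAIM (what is proved, stated in full; the proofs are below) =====
def Claim_equal_remove_inp_from_splitter_rpn : Prop := ∀ (splitter_rpn : List String) (inputs_to_remove : List String), Dom_remove_inp_from_splitter_rpn splitter_rpn inputs_to_remove → Pre_remove_inp_from_splitter_rpn splitter_rpn inputs_to_remove → Spec_remove_inp_from_splitter_rpn splitter_rpn inputs_to_remove (remove_inp_from_splitter_rpn splitter_rpn inputs_to_remove)

-- ===== LEMMAS AND PROOFS =====

-- A-state: (stack_inp, stack_sgn, from_last_sign); B-state: (removed, sgn_pos, counts)
abbrev pvSA : Type := List (Int × String) × List (Int × String) × List Int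
abbrev pvSB : Type := List Int × List Int × List Int

-- the coupling invariant after the first k reversed tokens of rev have been scanned
def pvInv (rev : List String) (k : Nat) (a : pvSA) (b : pvSB) : Prop :=
  b.2.2 = a.2.2
  ∧ b.2.1 = a.2.1.map (fun q => (rev.length : Int) - 1 - q.1)
  ∧ a.2.1.length = a.2.2.length
  ∧ List.Pairwise (fun p q => p.1 < q.1) a.2.1
  ∧ List.Pairwise (fun p q => p.1 < q.1) a.1
  ∧ (∀ p ∈ a.2.1, ∀ q ∈ a.1, p.1 ≠ q.1)
  ∧ (∀ p ∈ a.2.1 ++ a.1, ∃ j : Nat, ∃ _ : j < rev.length, j < k ∧ p = ((j : Int), rev[j]))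
  ∧ (∀ q : Int, q ∈ b.1 ↔ ∃ j : Nat, j < k ∧ j < rev.length ∧ q = (rev.length : Int) - 1 - (j : Int)
        ∧ ∀ p ∈ a.2.1 ++ a.1, p.1 ≠ (j : Int))

def pvRel (rev : List String) (k : Nat) (oa : Option pvSA) (ob : Option pvSB) : Prop :=
  (oa = none ∧ ob = none) ∨ (∃ a b, oa = some a ∧ ob = some b ∧ pvInv rev k a b)

theorem pvContainsInt_iff {s : PySem.Set Int} {x : Int} :
    PySem.Set.contains s x = true ↔ x ∈ s := by
  simp [PySem.Set.contains]

theorem pvLength_pySetD {α : Type} (xs : List α) (i : Int) (v : α) :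
    (PySem.List.pySetD xs i v).length = xs.length := by
  unfold PySem.List.pySetD PySem.List.pySet?
  cases h : PySem.List.pyIdx? xs.length i <;> simp

theorem pvPop?_neg_some {α : Type} (xs : List α) (c : Int) (h1 : 1 ≤ c)
    (h2 : c ≤ (xs.length : Int)) :
    PySem.List.pop? xs (-c)
      = some (xs[xs.length - c.toNat]'(by omega), xs.eraseIdx (xs.length - c.toNat)) := by
  have hx : xs.length - c.toNat < xs.length := by omega
  unfold PySem.List.pop? PySem.List.pyIdx?
  rw [if_neg (by omega), if_pos (by push_cast; omega)]
  have hidx : (- -c).toNat = c.toNat := by omega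
  rw [hidx]
  simp [List.getElem?_eq_getElem hx]

theorem pvPop?_neg_none {α : Type} (xs : List α) (c : Int) (h1 : 1 ≤ c)
    (h2 : (xs.length : Int) < c) :
    PySem.List.pop? xs (-c) = none := by
  unfold PySem.List.pop? PySem.List.pyIdx?
  rw [if_neg (by omega), if_neg (by push_cast; omega)]
  rfl

theorem pvMem_eraseIdx (sgn : List (Int × String))
    (hpw : List.Pairwise (fun p q => p.1 < q.1) sgn) (i : Nat) (h : i < sgn.length) :
    ∀ p, p ∈ sgn.eraseIdx i ↔ p ∈ sgn ∧ p.1 ≠ sgn[i].1 := by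
  intro p
  have hdec : sgn = sgn.take i ++ sgn[i] :: sgn.drop (i + 1) := by
    conv_lhs => rw [← List.take_append_drop i sgn]
    rw [List.drop_eq_getElem_cons h]
  have herase : sgn.eraseIdx i = sgn.take i ++ sgn.drop (i + 1) :=
    List.eraseIdx_eq_take_drop_succ sgn i
  have hpw2 : List.Pairwise (fun p q : Int × String => p.1 < q.1)
      (sgn.take i ++ sgn[i] :: sgn.drop (i + 1)) := by rw [← hdec]; exact hpw
  rw [List.pairwise_append] at hpw2
  obtain ⟨hpw_t, hpw_d, hcross⟩ := hpw2
  constructor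
  · intro hp
    rw [herase] at hp
    rcases List.mem_append.mp hp with hp | hp
    · refine ⟨by rw [hdec]; exact List.mem_append.mpr (Or.inl hp), ?_⟩
      have := hcross p hp sgn[i] (List.mem_cons_self ..)
      omega
    · refine ⟨by rw [hdec]; exact List.mem_append.mpr (Or.inr (List.mem_cons_of_mem _ hp)), ?_⟩
      have := (List.pairwise_cons.mp hpw_d).1 p hp
      omega
  · rintro ⟨hp, hne⟩
    rw [hdec] at hp
    rw [herase]
    rcases List.mem_append.mp hp with hp | hp
    · exact List.mem_append.mpr (Or.inl hp)
    · rcases List.mem_cons.mp hp with hp | hp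
      · exact absurd (by rw [hp]) hne
      · exact List.mem_append.mpr (Or.inr hp)

theorem pvEnum_rev_flip {α : Type} (xs : List α) :
    (PySem.List.enumerate xs 0).reverse
      = (PySem.List.enumerate xs.reverse 0).map (fun p => ((xs.length : Int) - 1 - p.1, p.2)) := by
  apply List.ext_getElem
  · simp [PySem.List.length_enumerate]
  · intro i h1 h2
    have hi : i < xs.length := by
      simpa [PySem.List.length_enumerate] using h2
    have hrl : i < xs.reverse.length := by simpa using hi
    rw [List.getElem_reverse, List.getElem_map]
    rw [PySem.List.getElem_enumerate, PySem.List.getElem_enumerate]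
    have hlen : (PySem.List.enumerate xs 0).length = xs.length := PySem.List.length_enumerate xs 0
    refine Prod.ext ?_ ?_
    · simp only
      rw [hlen]
      push_cast
      omega
    · simp only
      rw [List.getElem_reverse]
      congr 1
      rw [hlen]

theorem pvInsertBy_congr {α : Type} (f g : α → α → Bool) (P : α → Prop) (x : α) (ys : List α)
    (hx : P x) (hys : ∀ y ∈ ys, P y) (hfg : ∀ a b, P a → P b → f a b = g a b) :
    PySem.List.insertBy f x ys = PySem.List.insertBy g x ys := by
  induction ys with
  | nil => rfl
  | cons y ys ih =>
    have hy : P y := hys y (List.mem_cons_self ..)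
    have hys' : ∀ z ∈ ys, P z := fun z hz => hys z (List.mem_cons_of_mem _ hz)
    simp only [PySem.List.insertBy]
    rw [hfg x y hx hy]
    by_cases hgy : g x y = true
    · rw [if_pos hgy, if_pos hgy]
    · rw [if_neg hgy, if_neg hgy, ih hys']

theorem pvFoldl_insertBy_congr {α : Type} (f g : α → α → Bool) (P : α → Prop)
    (hfg : ∀ a b, P a → P b → f a b = g a b) :
    ∀ (l acc : List α), (∀ x ∈ l, P x) → (∀ y ∈ acc, P y) →
      l.foldl (fun acc x => PySem.List.insertBy f x acc) acc
        = l.foldl (fun acc x => PySem.List.insertBy g x acc) acc := by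
  intro l
  induction l with
  | nil => intro acc _ _; rfl
  | cons x l ih =>
    intro acc hl hacc
    have hx : P x := hl x (List.mem_cons_self ..)
    simp only [List.foldl_cons]
    rw [pvInsertBy_congr f g P x acc hx hacc hfg]
    exact ih _ (fun z hz => hl z (List.mem_cons_of_mem _ hz))
      (fun y hy => ((PySem.List.mem_insertBy g x y acc).mp hy).elim (fun h => h ▸ hx) (hacc y))

theorem pvSorted2_eq_desc (xs ys : List (Int × String))
    (hinj : ∀ a ∈ xs, ∀ b ∈ xs, a.1 = b.1 → a = b)
    (hperm : ys.Perm xs) (hdesc : List.Pairwise (fun a b => b.1 < a.1) ys) :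
    PySem.List.sorted2 xs (fun q => q.1) (fun q => q.2) true = ys := by
  have hcomp : ∀ a b : Int × String, a ∈ xs → b ∈ xs →
      (fun a b : Int × String =>
        decide (b.1 < a.1) || (!decide (a.1 < b.1) && decide (b.2 < a.2))) a b
      = (fun a b : Int × String => decide (b.1 < a.1)) a b := by
    intro a b ha hb
    simp only
    rcases lt_trichotomy a.1 b.1 with hlt | heq | hgt
    · have e1 : decide (b.1 < a.1) = false := decide_eq_false (by omega)
      have e2 : decide (a.1 < b.1) = true := decide_eq_true hlt
      rw [e1, e2]
      rfl
    · have : a = b := hinj a ha b hb heq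
      subst this
      have e1 : decide (a.1 < a.1) = false := decide_eq_false (by omega)
      have e2 : decide (a.2 < a.2) = false := decide_eq_false (by exact lt_irrefl _)
      rw [e1, e2]
      rfl
    · have e1 : decide (b.1 < a.1) = true := decide_eq_true hgt
      rw [e1]
      rfl
  have hstep : PySem.List.sorted2 xs (fun q => q.1) (fun q => q.2) true
      = PySem.List.sorted xs (fun q => q.1) true :=
    pvFoldl_insertBy_congr _ _ (fun p => p ∈ xs) hcomp xs [] (fun _ h => h) (by simp)
  rw [hstep]
  exact PySem.List.sorted_rev_eq_of_perm_of_pairwise_gt xs ys (fun q => q.1) hperm hdesc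

theorem pvFoldr_filter (removed : PySem.Set Int) (l : List (Int × String)) :
    l.foldr (fun p acc => if PySem.Set.contains removed p.1 then acc else p.2 :: acc) []
      = (l.filter (fun p => !PySem.Set.contains removed p.1)).map (fun q => q.2) := by
  induction l with
  | nil => rfl
  | cons p l ih =>
    rw [List.foldr_cons, ih, List.filter_cons]
    by_cases h : p.1 ∈ removed
    · simp [h]
    · simp [h]

theorem pvStep_rel (itr : List String) (rev : List String) (k : Nat) (hk : k < rev.length)
    (a : pvSA) (b : pvSB) (hinv : pvInv rev k a b) :
    pvRel rev (k + 1)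
      (pvStepA itr (some a) ((k : Int), rev[k]))
      (pvStepB (PySem.Set.ofList itr) (some b) ((rev.length : Int) - 1 - (k : Int), rev[k])) := by
  obtain ⟨inp, sgn, fls⟩ := a
  obtain ⟨rem, sp, cnt⟩ := b
  obtain ⟨h1, h2, h3, h4, h5, h6, h7, h8⟩ := hinv
  simp only at h1 h2 h3 h4 h5 h6 h7 h8
  subst h2
  have hball : ∀ p ∈ sgn ++ inp, 0 ≤ p.1 ∧ p.1 < (k : Int) := by
    intro p hp
    obtain ⟨j, _, hjk, hpj⟩ := h7 p hp
    subst hpj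
    exact ⟨by simp, by simpa using hjk⟩
  by_cases hsig : rev[k] = "." ∨ rev[k] = "*"
  · -- operator token: both push
    refine Or.inr ⟨(inp, sgn ++ [((k : Int), rev[k])], fls ++ [0]),
      (rem, (sgn.map (fun q => (rev.length : Int) - 1 - q.1)) ++ [(rev.length : Int) - 1 - (k : Int)],
        fls ++ [0]), ?_, ?_, ?_⟩
    · rcases hsig with h | h <;> simp [pvStepA, h]
    · rcases hsig with h | h <;> simp [pvStepB, h, h1]
    · refine ⟨rfl, by simp, by simp [h3], ?_, h5, ?_, ?_, ?_⟩
      · rw [List.pairwise_append]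
        refine ⟨h4, by simp, ?_⟩
        intro p hp q hq
        have := (hball p (List.mem_append.mpr (Or.inl hp))).2
        simp only [List.mem_singleton] at hq
        subst hq
        simpa using this
      · intro p hp q hq
        rcases List.mem_append.mp hp with hp | hp
        · exact h6 p hp q hq
        · simp only [List.mem_singleton] at hp
          subst hp
          have := (hball q (List.mem_append.mpr (Or.inr hq))).2
          simp only
          omega
      · intro p hp
        rcases List.mem_append.mp hp with hp | hp
        · rcases List.mem_append.mp hp with hp | hp
          · obtain ⟨j, hjr, hjk, hpj⟩ := h7 p (List.mem_append.mpr (Or.inl hp))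
            exact ⟨j, hjr, by omega, hpj⟩
          · simp only [List.mem_singleton] at hp
            subst hp
            exact ⟨k, hk, by omega, rfl⟩
        · obtain ⟨j, hjr, hjk, hpj⟩ := h7 p (List.mem_append.mpr (Or.inr hp))
          exact ⟨j, hjr, by omega, hpj⟩
      · intro q
        rw [h8 q]
        constructor
        · rintro ⟨j, hjk, hjr, hq, hall⟩
          refine ⟨j, by omega, hjr, hq, ?_⟩
          intro p hp
          rcases List.mem_append.mp hp with hp | hp
          · rcases List.mem_append.mp hp with hp | hp
            · exact hall p (List.mem_append.mpr (Or.inl hp))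
            · simp only [List.mem_singleton] at hp
              subst hp
              simp only
              omega
          · exact hall p (List.mem_append.mpr (Or.inr hp))
        · rintro ⟨j, hjk, hjr, hq, hall⟩
          have hjk' : j < k := by
            rcases Nat.lt_succ_iff_lt_or_eq.mp hjk with h | h
            · exact h
            · exfalso
              exact hall ((k : Int), rev[k])
                (List.mem_append.mpr (Or.inl (List.mem_append.mpr
                  (Or.inr (List.mem_singleton.mpr rfl))))) (by simp [h])
          refine ⟨j, hjk', hjr, hq, ?_⟩
          intro p hp
          rcases List.mem_append.mp hp with hp | hp
          · exact hall p (List.mem_append.mpr (Or.inl (List.mem_append.mpr (Or.inl hp))))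
          · exact hall p (List.mem_append.mpr (Or.inr hp))
  · by_cases hkeep : rev[k] ∈ itr
    · -- removed token
      by_cases hfls : fls = []
      · -- no pending operator: A passes, B only records the position
        subst hfls
        have hsgn : sgn = [] := by
          cases sgn with
          | nil => rfl
          | cons s t => simp at h3
        subst hsgn
        refine Or.inr ⟨(inp, [], []),
          (PySem.Set.add rem ((rev.length : Int) - 1 - (k : Int)), [], []), ?_, ?_, ?_⟩
        · simp [pvStepA, hsig, hkeep]
        · simp [pvStepB, hsig, hkeep, h1]
        · refine ⟨rfl, by simp, rfl, List.Pairwise.nil, h5, by simp, ?_, ?_⟩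
          · intro p hp
            obtain ⟨j, hjr, hjk, hpj⟩ := h7 p hp
            exact ⟨j, hjr, by omega, hpj⟩
          · intro q
            rw [PySem.Set.mem_add, h8 q]
            constructor
            · rintro (⟨j, hjk, hjr, hq, hall⟩ | hq)
              · exact ⟨j, by omega, hjr, hq, hall⟩
              · exact ⟨k, by omega, hk, hq, fun p hp => by
                  have := (hball p hp).2
                  omega⟩
            · rintro ⟨j, hjk, hjr, hq, hall⟩
              rcases Nat.lt_succ_iff_lt_or_eq.mp hjk with h | h
              · exact Or.inl ⟨j, h, hjr, hq, hall⟩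
              · subst h
                exact Or.inr hq
      · -- pending operator: pop the counter and one operator
        obtain ⟨xs, c, hflsx⟩ := (List.eq_nil_or_concat fls).resolve_left hfls
        rw [List.concat_eq_append] at hflsx
        subst hflsx
        have hsgnne : sgn ≠ [] := by
          intro h
          rw [h] at h3
          simp at h3
        have hget : PySem.List.pyGetD (xs ++ [c]) (-1) 0 = c :=
          PySem.List.pyGetD_neg_one_append_singleton xs c 0
        by_cases hc : c ≤ 1
        · -- pop the innermost operator
          obtain ⟨ys, s, hsgnx⟩ := (List.eq_nil_or_concat sgn).resolve_left hsgnne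
          rw [List.concat_eq_append] at hsgnx
          subst hsgnx
          obtain ⟨j0, hj0r, hj0k, hsj⟩ := h7 s
            (List.mem_append.mpr (Or.inl (List.mem_append.mpr
              (Or.inr (List.mem_singleton.mpr rfl)))))
          refine Or.inr ⟨(inp, ys, xs),
            (PySem.Set.add (PySem.Set.add rem ((rev.length : Int) - 1 - (k : Int)))
              ((rev.length : Int) - 1 - s.1),
              ys.map (fun q => (rev.length : Int) - 1 - q.1), xs), ?_, ?_, ?_⟩
          · simp [pvStepA, hsig, hkeep, hget, hc, PySem.List.pop?_last]
          · simp [pvStepB, hsig, hkeep, hc, hget, h1, PySem.List.pop?_last]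
          · have hpwy : List.Pairwise (fun p q : Int × String => p.1 < q.1) ys :=
              (List.pairwise_append.mp h4).1
            refine ⟨rfl, rfl, by simpa using h3, hpwy, h5, ?_, ?_, ?_⟩
            · intro p hp q hq
              exact h6 p (List.mem_append.mpr (Or.inl hp)) q hq
            · intro p hp
              have hpm : p ∈ (ys ++ [s]) ++ inp := by
                rcases List.mem_append.mp hp with hp | hp
                · exact List.mem_append.mpr (Or.inl (List.mem_append.mpr (Or.inl hp)))
                · exact List.mem_append.mpr (Or.inr hp)
              obtain ⟨j, hjr, hjk, hpj⟩ := h7 p hpm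
              exact ⟨j, hjr, by omega, hpj⟩
            · intro q
              rw [PySem.Set.mem_add, PySem.Set.mem_add, h8 q]
              have hsfst : ∀ p ∈ ys ++ inp, p.1 ≠ s.1 := by
                intro p hp
                rcases List.mem_append.mp hp with hp | hp
                · have := (List.pairwise_append.mp h4).2.2 p hp s (List.mem_singleton.mpr rfl)
                  omega
                · exact Ne.symm (h6 s (List.mem_append.mpr (Or.inr (List.mem_singleton.mpr rfl))) p hp)
              constructor
              · rintro ((⟨j, hjk, hjr, hq, hall⟩ | hq) | hq)
                · refine ⟨j, by omega, hjr, hq, ?_⟩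
                  intro p hp
                  apply hall p
                  rcases List.mem_append.mp hp with hp | hp
                  · exact List.mem_append.mpr (Or.inl (List.mem_append.mpr (Or.inl hp)))
                  · exact List.mem_append.mpr (Or.inr hp)
                · refine ⟨k, by omega, hk, hq, fun p hp => ?_⟩
                  have : p ∈ (ys ++ [s]) ++ inp := by
                    rcases List.mem_append.mp hp with hp | hp
                    · exact List.mem_append.mpr (Or.inl (List.mem_append.mpr (Or.inl hp)))
                    · exact List.mem_append.mpr (Or.inr hp)
                  have := (hball p this).2
                  omega
                · refine ⟨j0, by omega, hj0r, by rw [hq, hsj], ?_⟩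
                  intro p hp
                  have := hsfst p hp
                  rw [hsj] at this
                  simpa using this
              · rintro ⟨j, hjk, hjr, hq, hall⟩
                rcases Nat.lt_succ_iff_lt_or_eq.mp hjk with hj | hj
                · by_cases hjs : (j : Int) = s.1
                  · right
                    rw [hq, hjs]
                  · left; left
                    refine ⟨j, hj, hjr, hq, ?_⟩
                    intro p hp
                    rcases List.mem_append.mp hp with hp | hp
                    · rcases List.mem_append.mp hp with hp | hp
                      · exact hall p (List.mem_append.mpr (Or.inl hp))
                      · simp only [List.mem_singleton] at hp
                        subst hp
                        exact fun h => hjs h.symm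
                    · exact hall p (List.mem_append.mpr (Or.inr hp))
                · subst hj
                  left; right
                  exact hq
        · -- pop the operator 'count' levels down
          push_neg at hc
          have hc1 : 1 ≤ c := by omega
          by_cases hclen : c ≤ (sgn.length : Int)
          · -- in range: both erase the operator at index len - c
            have hilt : sgn.length - c.toNat < sgn.length := by omega
            have hpopA := pvPop?_neg_some sgn c hc1 hclen
            have hpopB := pvPop?_neg_some (sgn.map (fun q => (rev.length : Int) - 1 - q.1)) c hc1
              (by simpa using hclen)
            simp only [List.length_map, List.eraseIdx_map, List.getElem_map] at hpopB
            obtain ⟨j0, hj0r, hj0k, hsj⟩ := h7 (sgn[sgn.length - c.toNat])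
              (List.mem_append.mpr (Or.inl (List.getElem_mem hilt)))
            refine Or.inr ⟨(inp, sgn.eraseIdx (sgn.length - c.toNat), xs),
              (PySem.Set.add (PySem.Set.add rem ((rev.length : Int) - 1 - (k : Int)))
                ((rev.length : Int) - 1 - (sgn[sgn.length - c.toNat]).1),
               (sgn.eraseIdx (sgn.length - c.toNat)).map
                 (fun q => (rev.length : Int) - 1 - q.1), xs), ?_, ?_, ?_⟩
            · simp [pvStepA, hsig, hkeep, hget, hpopA,
                PySem.List.pop?_last, show ¬ c ≤ 1 by omega]
            · simp [pvStepB, hsig, hkeep, hpopB, h1, PySem.List.pop?_last, show ¬ c ≤ 1 by omega]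
            · have hmemE := pvMem_eraseIdx sgn h4 (sgn.length - c.toNat) hilt
              refine ⟨rfl, rfl, ?_,
                List.Pairwise.sublist (List.eraseIdx_sublist sgn (sgn.length - c.toNat)) h4,
                h5, ?_, ?_, ?_⟩
              · rw [List.length_eraseIdx, if_pos hilt]
                simp only [List.length_append, List.length_cons, List.length_nil] at h3 ⊢
                omega
              · intro p hp q hq
                exact h6 p ((hmemE p).mp hp).1 q hq
              · intro p hp
                have hpm : p ∈ sgn ++ inp := by
                  rcases List.mem_append.mp hp with hp | hp
                  · exact List.mem_append.mpr (Or.inl ((hmemE p).mp hp).1)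
                  · exact List.mem_append.mpr (Or.inr hp)
                obtain ⟨j, hjr, hjk, hpj⟩ := h7 p hpm
                exact ⟨j, hjr, by omega, hpj⟩
              · intro q
                rw [PySem.Set.mem_add, PySem.Set.mem_add, h8 q]
                have hsfst : ∀ p ∈ sgn.eraseIdx (sgn.length - c.toNat) ++ inp,
                    p.1 ≠ (sgn[sgn.length - c.toNat]).1 := by
                  intro p hp
                  rcases List.mem_append.mp hp with hp | hp
                  · exact ((hmemE p).mp hp).2
                  · exact Ne.symm (h6 (sgn[sgn.length - c.toNat]) (List.getElem_mem hilt) p hp)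
                constructor
                · rintro ((⟨j, hjk, hjr, hq, hall⟩ | hq) | hq)
                  · refine ⟨j, by omega, hjr, hq, ?_⟩
                    intro p hp
                    apply hall p
                    rcases List.mem_append.mp hp with hp | hp
                    · exact List.mem_append.mpr (Or.inl ((hmemE p).mp hp).1)
                    · exact List.mem_append.mpr (Or.inr hp)
                  · refine ⟨k, by omega, hk, hq, fun p hp => ?_⟩
                    have hpm : p ∈ sgn ++ inp := by
                      rcases List.mem_append.mp hp with hp | hp
                      · exact List.mem_append.mpr (Or.inl ((hmemE p).mp hp).1)
                      · exact List.mem_append.mpr (Or.inr hp)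
                    have := (hball p hpm).2
                    omega
                  · refine ⟨j0, by omega, hj0r, by rw [hq, hsj], ?_⟩
                    intro p hp
                    have := hsfst p hp
                    rw [hsj] at this
                    simpa using this
                · rintro ⟨j, hjk, hjr, hq, hall⟩
                  rcases Nat.lt_succ_iff_lt_or_eq.mp hjk with hj | hj
                  · by_cases hjs : (j : Int) = (sgn[sgn.length - c.toNat]).1
                    · right
                      rw [hq, hjs]
                    · left; left
                      refine ⟨j, hj, hjr, hq, ?_⟩
                      intro p hp
                      rcases List.mem_append.mp hp with hp | hp
                      · by_cases hps : p.1 = (sgn[sgn.length - c.toNat]).1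
                        · exact fun h => hjs (by rw [← h, hps])
                        · exact hall p (List.mem_append.mpr (Or.inl ((hmemE p).mpr ⟨hp, hps⟩)))
                      · exact hall p (List.mem_append.mpr (Or.inr hp))
                  · subst hj
                    left; right
                    exact hq
          · -- out of range: both raise (state none)
            push_neg at hclen
            have hpopA := pvPop?_neg_none sgn c hc1 hclen
            have hpopB := pvPop?_neg_none (sgn.map (fun q => (rev.length : Int) - 1 - q.1)) c hc1
              (by simpa using hclen)
            refine Or.inl ⟨?_, ?_⟩
            · simp [pvStepA, hsig, hkeep, hget, hpopA, PySem.List.pop?_last,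
                show ¬ c ≤ 1 by omega]
            · simp [pvStepB, hsig, hkeep, hpopB, h1, PySem.List.pop?_last, show ¬ c ≤ 1 by omega]
    · -- kept input token
      refine Or.inr ⟨(inp ++ [((k : Int), rev[k])], sgn,
          if fls ≠ [] then PySem.List.pySetD fls (-1) (PySem.List.pyGetD fls (-1) 0 + 1) else fls),
        (rem, sgn.map (fun q => (rev.length : Int) - 1 - q.1),
          if fls ≠ [] then PySem.List.pySetD fls (-1) (PySem.List.pyGetD fls (-1) 0 + 1) else fls),
        ?_, ?_, ?_⟩
      · simp [pvStepA, hsig, hkeep]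
      · simp [pvStepB, hsig, hkeep, h1]
      · refine ⟨rfl, rfl, ?_, h4, ?_, ?_, ?_, ?_⟩
        · by_cases hfls : fls = []
          · simp [hfls, h3]
          · simp [hfls, h3, pvLength_pySetD]
        · rw [List.pairwise_append]
          refine ⟨h5, by simp, ?_⟩
          intro p hp q hq
          have := (hball p (List.mem_append.mpr (Or.inr hp))).2
          simp only [List.mem_singleton] at hq
          subst hq
          simpa using this
        · intro p hp q hq
          rcases List.mem_append.mp hq with hq | hq
          · exact h6 p hp q hq
          · simp only [List.mem_singleton] at hq
            subst hq
            have := (hball p (List.mem_append.mpr (Or.inl hp))).2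
            simp only
            omega
        · intro p hp
          rcases List.mem_append.mp hp with hp | hp
          · obtain ⟨j, hjr, hjk, hpj⟩ := h7 p (List.mem_append.mpr (Or.inl hp))
            exact ⟨j, hjr, by omega, hpj⟩
          · rcases List.mem_append.mp hp with hp | hp
            · obtain ⟨j, hjr, hjk, hpj⟩ := h7 p (List.mem_append.mpr (Or.inr hp))
              exact ⟨j, hjr, by omega, hpj⟩
            · simp only [List.mem_singleton] at hp
              subst hp
              exact ⟨k, hk, by omega, rfl⟩
        · intro q
          rw [h8 q]
          constructor
          · rintro ⟨j, hjk, hjr, hq, hall⟩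
            refine ⟨j, by omega, hjr, hq, ?_⟩
            intro p hp
            rcases List.mem_append.mp hp with hp | hp
            · exact hall p (List.mem_append.mpr (Or.inl hp))
            · rcases List.mem_append.mp hp with hp | hp
              · exact hall p (List.mem_append.mpr (Or.inr hp))
              · simp only [List.mem_singleton] at hp
                subst hp
                simp only
                omega
          · rintro ⟨j, hjk, hjr, hq, hall⟩
            have hjk' : j < k := by
              rcases Nat.lt_succ_iff_lt_or_eq.mp hjk with h | h
              · exact h
              · exfalso
                exact hall ((k : Int), rev[k])
                  (List.mem_append.mpr (Or.inr (List.mem_append.mpr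
                    (Or.inr (List.mem_singleton.mpr rfl))))) (by simp [h])
            refine ⟨j, hjk', hjr, hq, ?_⟩
            intro p hp
            rcases List.mem_append.mp hp with hp | hp
            · exact hall p (List.mem_append.mpr (Or.inl hp))
            · exact hall p (List.mem_append.mpr (Or.inr (List.mem_append.mpr (Or.inl hp))))

theorem pvFold_rel (itr : List String) (rev : List String) :
    ∀ (rest : List String) (k : Nat), rest = rev.drop k →
    ∀ (oa : Option pvSA) (ob : Option pvSB), pvRel rev k oa ob →
    pvRel rev (k + rest.length)
      ((PySem.List.enumerate rest (k : Int)).foldl (pvStepA itr) oa)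
      ((PySem.List.enumerate rest (k : Int)).foldl
        (fun st p => pvStepB (PySem.Set.ofList itr) st ((rev.length : Int) - 1 - p.1, p.2)) ob) := by
  intro rest
  induction rest with
  | nil =>
    intro k _ oa ob hrel
    simpa [PySem.List.enumerate_nil] using hrel
  | cons x rest ih =>
    intro k hrest oa ob hrel
    have hk : k < rev.length := by
      by_contra h
      rw [List.drop_eq_nil_iff.mpr (by omega)] at hrest
      exact List.cons_ne_nil x rest hrest
    rw [List.drop_eq_getElem_cons hk] at hrest
    injection hrest with hx hrest'
    subst hx
    rw [PySem.List.enumerate_cons]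
    simp only [List.foldl_cons]
    have hstep : pvRel rev (k + 1)
        (pvStepA itr oa ((k : Int), rev[k]))
        (pvStepB (PySem.Set.ofList itr) ob ((rev.length : Int) - 1 - (k : Int), rev[k])) := by
      rcases hrel with ⟨ha, hb⟩ | ⟨a, b, ha, hb, hinv⟩
      · subst ha; subst hb
        exact Or.inl ⟨rfl, rfl⟩
      · subst ha; subst hb
        exact pvStep_rel itr rev k hk a b hinv
    have hrec := ih (k + 1) hrest' _ _ hstep
    have harith : k + (rest.length + 1) = (k + 1) + rest.length := by omega
    rw [List.length_cons, harith]
    have hcast : ((k : Int) + 1) = (((k + 1 : Nat)) : Int) := by push_cast; ring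
    rw [hcast]
    exact hrec

theorem pvFinal (spl : List String) (a : pvSA) (b : pvSB)
    (hinv : pvInv spl.reverse spl.reverse.length a b) :
    (PySem.List.sorted2 (a.2.1 ++ a.1) (fun q => q.1) (fun q => q.2) true).map (fun q => q.2)
      = (PySem.List.enumerate spl).foldr
          (fun p acc => if PySem.Set.contains b.1 p.1 then acc else p.2 :: acc) [] := by
  obtain ⟨inp, sgn, fls⟩ := a
  obtain ⟨rem, sp, cnt⟩ := b
  obtain ⟨h1, h2, h3, h4, h5, h6, h7, h8⟩ := hinv
  simp only at h1 h2 h3 h4 h5 h6 h7 h8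
  simp only [List.length_reverse] at h7 h8
  set S : List (Int × String) := sgn ++ inp with hS
  have hSmem : ∀ p ∈ S, ∃ j : Nat, ∃ _ : j < spl.reverse.length,
      p = ((j : Int), spl.reverse[j]) := by
    intro p hp
    obtain ⟨j, hjr, _, hpj⟩ := h7 p hp
    exact ⟨j, by simpa using hjr, hpj⟩
  have hSnd : ∀ p ∈ S, ∀ q ∈ S, p.1 = q.1 → p = q := by
    intro p hp q hq heq
    obtain ⟨j1, hj1, hp1⟩ := hSmem p hp
    obtain ⟨j2, hj2, hq1⟩ := hSmem q hq
    rw [hp1, hq1]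
    rw [hp1, hq1] at heq
    have heq' : (j1 : Int) = (j2 : Int) := heq
    have : j1 = j2 := by exact_mod_cast heq'
    subst this
    rfl
  set ys : List (Int × String) :=
    ((PySem.List.enumerate spl.reverse).filter (fun p => decide (p ∈ S))).reverse with hys
  have hperm : ys.Perm S := by
    apply (List.perm_ext_iff_of_nodup ?_ ?_).mpr
    · intro p
      rw [hys]
      simp only [List.mem_reverse, List.mem_filter, decide_eq_true_eq]
      constructor
      · rintro ⟨_, hp⟩
        exact hp
      · intro hp
        refine ⟨?_, hp⟩
        obtain ⟨j, hj, hpj⟩ := hSmem p hp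
        rw [PySem.List.mem_enumerate_iff]
        exact ⟨j, hj, by rw [hpj]; simp⟩
    · rw [hys, List.nodup_reverse]
      haveI : Std.Irrefl (fun p q : Int × String => p.1 < q.1) := ⟨fun a => lt_irrefl a.1⟩
      exact ((PySem.List.pairwise_lt_enumerate spl.reverse (0 : Int)).filter _).nodup
    · rw [hS]
      have hpw : List.Pairwise (fun p q : Int × String => p.1 ≠ q.1) (sgn ++ inp) := by
        rw [List.pairwise_append]
        exact ⟨h4.imp (fun h => by omega), h5.imp (fun h => by omega), h6⟩
      haveI : Std.Irrefl (fun p q : Int × String => p.1 ≠ q.1) := ⟨fun a h => h rfl⟩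
      exact hpw.nodup
  have hdesc : List.Pairwise (fun p q : Int × String => q.1 < p.1) ys := by
    rw [hys, List.pairwise_reverse]
    exact (PySem.List.pairwise_lt_enumerate spl.reverse 0).filter _
  rw [pvSorted2_eq_desc S ys hSnd hperm hdesc, pvFoldr_filter, hys]
  rw [← List.filter_reverse, pvEnum_rev_flip spl.reverse, List.reverse_reverse, List.filter_map,
    List.map_map, List.length_reverse]
  have hsndf : ((fun q : Int × String => q.2) ∘
      (fun p : Int × String => ((spl.length : Int) - 1 - p.1, p.2)))
      = (fun q : Int × String => q.2) := by
    funext p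
    rfl
  rw [hsndf]
  congr 1
  apply List.filter_congr
  intro p hp
  obtain ⟨j, hj, hpj⟩ := (PySem.List.mem_enumerate_iff spl 0 p).mp hp
  have hpj' : p = ((j : Int), spl[j]) := by
    rw [hpj]
    simp
  subst hpj'
  simp only [Function.comp]
  by_cases hmem : ((j : Int), spl[j]).1 ∈ rem
  · have hcb : PySem.Set.contains rem ((j : Int), spl[j]).1 = true := pvContainsInt_iff.mpr hmem
    rw [hcb]
    obtain ⟨jj, hjjk, hjjr, hq, hall⟩ := (h8 _).mp hmem
    have hq' : (j : Int) = (spl.length : Int) - 1 - (jj : Int) := hq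
    have hnotin : ((spl.length : Int) - 1 - (j : Int), spl[j]) ∉ S := by
      intro hmem2
      exact hall _ hmem2 (show ((spl.length : Int) - 1 - (j : Int)) = (jj : Int) by omega)
    simp [hnotin]
  · have hcb : PySem.Set.contains rem ((j : Int), spl[j]).1 = false := by
      rw [← Bool.not_eq_true, pvContainsInt_iff]
      exact hmem
    rw [hcb]
    apply decide_eq_true
    have hnr : ¬ (∃ jj : Nat, jj < spl.length ∧ jj < spl.length
        ∧ ((j : Int), spl[j]).1 = (spl.length : Int) - 1 - (jj : Int)
        ∧ ∀ s ∈ S, s.1 ≠ (jj : Int)) := fun hr => hmem ((h8 _).mpr hr)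
    push_neg at hnr
    have hjj : spl.length - 1 - j < spl.length := by omega
    obtain ⟨s, hsS, hseq⟩ := hnr (spl.length - 1 - j) hjj hjj
      (show ((j : Int)) = (spl.length : Int) - 1 - ((spl.length - 1 - j : Nat) : Int) by omega)
    obtain ⟨j2, hj2, hs2⟩ := hSmem s hsS
    have hseq2 : (j2 : Int) = ((spl.length - 1 - j : Nat) : Int) := by
      have h0 := hseq
      rw [hs2] at h0
      exact h0
    have hj2e : j2 = spl.length - 1 - j := by exact_mod_cast hseq2
    subst hj2e
    have hrevget : spl.reverse[spl.length - 1 - j]'hj2 = spl[j] := by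
      rw [List.getElem_reverse]
      congr 1
      omega
    have hps : ((spl.length : Int) - 1 - (j : Int), spl[j]) = s := by
      rw [hs2]
      refine Prod.ext ?_ ?_
      · show ((spl.length : Int) - 1 - (j : Int)) = ((spl.length - 1 - j : Nat) : Int)
        omega
      · show spl[j] = spl.reverse[spl.length - 1 - j]'hj2
        rw [hrevget]
    rw [hps]
    exact hsS

-- ===== VERDICT (by name: the statement is the Claim_ definition above) =====
theorem remove_inp_from_splitter_rpn_spec : Claim_equal_remove_inp_from_splitter_rpn := by
  intro spl itr _hdom _hpre
  unfold Spec_remove_inp_from_splitter_rpn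
  unfold remove_inp_from_splitter_rpn remove_inp_from_splitter_rpn_alt
  simp only [pvEnum_rev_flip spl, List.foldl_map, List.length_reverse]
  have hrel := pvFold_rel itr spl.reverse spl.reverse 0 (by simp)
      (some ([], [], [])) (some (PySem.Set.empty, [], []))
      (Or.inr ⟨([], [], []), (PySem.Set.empty, [], []), rfl, rfl, by
        refine ⟨rfl, rfl, rfl, List.Pairwise.nil, List.Pairwise.nil, by simp, by simp, ?_⟩
        intro q
        simp [PySem.Set.empty]⟩)
  simp only [Nat.cast_zero, Nat.zero_add, List.length_reverse] at hrel
  rcases hrel with ⟨ha, hb⟩ | ⟨a, b, ha, hb, hinv⟩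
  · rw [ha, hb]
  · obtain ⟨inp, sgn, fls⟩ := a
    obtain ⟨rem, sp, cnt⟩ := b
    rw [ha, hb]
    have hfin := pvFinal spl (inp, sgn, fls) (rem, sp, cnt) (by simpa using hinv)
    simpa using hfin
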